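-- pv_equiv track=rewrite | github.com/cislab-ntut/Garbled_Circuit_Project2_Team5 | new_version/create_circuit2.py | get_out_org
-- ===== SOURCE A (Python) =====
-- def get_out_org(input1_index, input2_index, t_table):
-- 	lst = list()
-- 	for i in range(len(t_table[0])):
-- 		if input1_index == t_table[0][i]:
-- 			lst.append(i)
-- 	for j in lst:
-- 		if input2_index == t_table[1][j]:
-- 			return t_table[2][j]
-- ===== SOURCE B (Python) =====
-- def get_out_org(input1_index, input2_index, t_table):
--     index = {}
--     for a, b, c in zip(t_table[0], t_table[1], t_table[2]):
--         index.setdefault((a, b), c)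
--     return index.get((input1_index, input2_index))
-- ===== Notes on version B (the rewrite author's own statement) =====
-- stated objective: idiomatic
-- what changed: Replaces the collect-matching-indices-then-rescan two-loop structure with a single zip pass that builds a combined-key dict (first occurrence wins via setdefault) followed by one dict.get lookup.
-- outside the precondition, e.g. on get_out_org(0, 0, [[1]]): A returns None, B raises IndexError; on get_out_org(1, 2, [[1, 1], [2], [7]]): A returns 7, B returns 7
import Mathlib
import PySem

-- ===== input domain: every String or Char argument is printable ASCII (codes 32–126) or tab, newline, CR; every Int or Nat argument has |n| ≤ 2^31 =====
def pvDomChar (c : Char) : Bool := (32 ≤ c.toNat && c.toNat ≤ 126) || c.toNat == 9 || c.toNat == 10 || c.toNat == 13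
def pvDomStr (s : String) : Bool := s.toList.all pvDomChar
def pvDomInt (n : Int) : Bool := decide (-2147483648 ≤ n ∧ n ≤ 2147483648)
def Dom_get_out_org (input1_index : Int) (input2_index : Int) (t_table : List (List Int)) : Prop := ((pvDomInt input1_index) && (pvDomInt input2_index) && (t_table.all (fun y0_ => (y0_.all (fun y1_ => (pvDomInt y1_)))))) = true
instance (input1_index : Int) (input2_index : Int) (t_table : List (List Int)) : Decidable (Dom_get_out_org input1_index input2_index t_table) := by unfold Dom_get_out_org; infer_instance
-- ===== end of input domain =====

-- B replaces A's collect-indices-then-rescan loops by one zip pass building a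
-- first-occurrence dict keyed by (row0, row1) pairs, then a single lookup (idiomatic).

-- ===== PORT A =====
-- A's second loop: 'for j in lst: if input2_index == t_table[1][j]: return t_table[2][j]'
def goScanA (input2_index : Int) (r1 r2 : List Int) : List Int → Option Int
  | [] => none
  | j :: rest =>
    if input2_index = PySem.List.pyGetD r1 j 0 then PySem.List.pyGet? r2 j
    else goScanA input2_index r1 r2 rest

def get_out_org (input1_index : Int) (input2_index : Int) (t_table : List (List Int)) : Option Int :=
  let r0 := (PySem.List.pyGet? t_table 0).getD []
  let lst := (PySem.List.pyRange 0 (r0.length : Int) 1).foldl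
      (fun acc i => if input1_index = PySem.List.pyGetD r0 i 0 then acc ++ [i] else acc) []
  goScanA input2_index ((PySem.List.pyGet? t_table 1).getD [])
    ((PySem.List.pyGet? t_table 2).getD []) lst

-- ===== PORT B =====
def get_out_org_alt (input1_index : Int) (input2_index : Int) (t_table : List (List Int)) : Option Int :=
  let r0 := (PySem.List.pyGet? t_table 0).getD []
  let r1 := (PySem.List.pyGet? t_table 1).getD []
  let r2 := (PySem.List.pyGet? t_table 2).getD []
  let d := (r0.zip (r1.zip r2)).foldl
      (fun d p => PySem.Dict.setdefault d (p.1, p.2.1) p.2.2) PySem.Dict.empty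
  PySem.Dict.get? d (input1_index, input2_index)

-- ===== PRECONDITION & SPEC =====
-- Pre_ restricts to the function's natural domain: tables with at least three rows in
-- which rows 1 and 2 cover every row-0 match.  Outside it A raises IndexError, or (on a
-- short/ragged table) returns a value only because its scan stopped before the
-- out-of-range access, while B's single zip pass always needs all three rows.
def Pre_get_out_org (input1_index : Int) (input2_index : Int) (t_table : List (List Int)) : Prop :=
  3 ≤ t_table.length ∧
  ∀ i : Nat, i < (t_table.getD 0 []).length →
    (t_table.getD 0 []).getD i 0 = input1_index →
    i < (t_table.getD 1 []).length ∧
      ((t_table.getD 1 []).getD i 0 = input2_index → i < (t_table.getD 2 []).length)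
instance (input1_index : Int) (input2_index : Int) (t_table : List (List Int)) : Decidable (Pre_get_out_org input1_index input2_index t_table) := by unfold Pre_get_out_org; infer_instance

def pvWitness_get_out_org : Int × Int × List (List Int) := (1, 2, [[1], [2], [5]])

def Spec_get_out_org (input1_index : Int) (input2_index : Int) (t_table : List (List Int)) (out : Option Int) : Prop := out = get_out_org_alt input1_index input2_index t_table
instance (input1_index : Int) (input2_index : Int) (t_table : List (List Int)) (out : Option Int) : Decidable (Spec_get_out_org input1_index input2_index t_table out) := by unfold Spec_get_out_org; infer_instance

-- ===== CLAIM (what is proved, stated in full; the proofs are below) =====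
def Claim_equal_get_out_org : Prop := ∀ (input1_index : Int) (input2_index : Int) (t_table : List (List Int)), Dom_get_out_org input1_index input2_index t_table → Pre_get_out_org input1_index input2_index t_table → Spec_get_out_org input1_index input2_index t_table (get_out_org input1_index input2_index t_table)

-- ===== LEMMAS AND PROOFS =====

-- A's scan of the filtered index list is a find-first over the unfiltered indices.
theorem goScanA_filter (i1 i2 : Int) (r0 r1 r2 : List Int) :
    ∀ ks : List Nat,
      goScanA i2 r1 r2 (List.map (fun k : Nat => (k : Int)) (ks.filter (fun k => decide (i1 = r0.getD k 0))))
        = (ks.find? (fun k => decide (i1 = r0.getD k 0) && decide (i2 = r1.getD k 0))).bind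
            (fun k => r2[k]?) := by
  intro ks
  induction ks with
  | nil => rfl
  | cons k ks ih =>
    by_cases h1 : i1 = r0.getD k 0
    · have d1 : decide (i1 = r0.getD k 0) = true := decide_eq_true h1
      by_cases h2 : i2 = r1.getD k 0
      · have d2 : decide (i2 = r1.getD k 0) = true := decide_eq_true h2
        simp only [List.filter_cons, List.find?_cons, d1, d2, if_true, Bool.and_self,
          List.map_cons, goScanA, PySem.List.pyGetD_natCast, PySem.List.pyGet?_natCast]
        rw [if_pos h2]
        rfl
      · have d2 : decide (i2 = r1.getD k 0) = false := decide_eq_false h2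
        simp only [List.filter_cons, List.find?_cons, d1, d2, if_true, Bool.true_and,
          List.map_cons, goScanA, PySem.List.pyGetD_natCast, PySem.List.pyGet?_natCast]
        rw [if_neg h2, ih]
    · have d1 : decide (i1 = r0.getD k 0) = false := decide_eq_false h1
      simp only [List.filter_cons, List.find?_cons, d1, Bool.false_and]
      exact ih

-- Core: find-first over indices equals find-first over the zipped rows, given the
-- coverage precondition.
theorem core_find (i1 i2 : Int) :
    ∀ (r0 r1 r2 : List Int),
      (∀ i : Nat, i < r0.length → r0.getD i 0 = i1 →
        i < r1.length ∧ (r1.getD i 0 = i2 → i < r2.length)) →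
      ((List.range r0.length).find?
          (fun k => decide (i1 = r0.getD k 0) && decide (i2 = r1.getD k 0))).bind
        (fun k => r2[k]?)
        = ((r0.zip (r1.zip r2)).find? (fun p => p.1 == i1 && p.2.1 == i2)).map
            (fun p => p.2.2) := by
  intro r0
  induction r0 with
  | nil => intro r1 r2 _; rfl
  | cons a as ih =>
    intro r1 r2 hpre
    cases r1 with
    | nil =>
      have hnone : (List.range (a :: as).length).find?
          (fun k => decide (i1 = (a :: as).getD k 0) && decide (i2 = ([] : List Int).getD k 0))
          = none := by
        apply List.find?_eq_none.mpr
        intro k hk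
        simp only [List.mem_range] at hk
        simp only [Bool.and_eq_true, decide_eq_true_eq, not_and]
        intro h1 _
        exact absurd ((hpre k hk h1.symm).1) (by simp)
      rw [hnone]
      rfl
    | cons b bs =>
      cases r2 with
      | nil =>
        have hnone : (List.range (a :: as).length).find?
            (fun k => decide (i1 = (a :: as).getD k 0) && decide (i2 = (b :: bs).getD k 0))
            = none := by
          apply List.find?_eq_none.mpr
          intro k hk
          simp only [List.mem_range] at hk
          simp only [Bool.and_eq_true, decide_eq_true_eq, not_and]
          intro h1 h2
          exact absurd ((hpre k hk h1.symm).2 h2.symm) (by simp)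
        rw [hnone]
        rfl
      | cons c cs =>
        have hbind : ∀ o : Option Nat,
            (o.map Nat.succ).bind (fun k => (c :: cs)[k]?) = o.bind (fun k => cs[k]?) := by
          intro o; cases o <;> rfl
        have hpred : ((fun k => decide (i1 = (a :: as).getD k 0) &&
            decide (i2 = (b :: bs).getD k 0)) ∘ Nat.succ)
            = fun k => decide (i1 = as.getD k 0) && decide (i2 = bs.getD k 0) := by
          funext k
          simp only [Function.comp_apply, Nat.succ_eq_add_one, List.getD_cons_succ]
        have hpre' : ∀ i : Nat, i < as.length → as.getD i 0 = i1 →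
            i < bs.length ∧ (bs.getD i 0 = i2 → i < cs.length) := by
          intro i hi hia
          have h := hpre (i + 1) (by simpa using Nat.succ_lt_succ hi)
            (by simpa [List.getD_cons_succ] using hia)
          exact ⟨by simpa using h.1, fun hb => by
            simpa using h.2 (by simpa [List.getD_cons_succ] using hb)⟩
        have hrange : List.range (a :: as).length = 0 :: (List.range as.length).map Nat.succ := by
          rw [List.length_cons, List.range_succ_eq_map]
        rw [hrange, List.zip_cons_cons, List.zip_cons_cons]
        by_cases h1 : i1 = a
        · by_cases h2 : i2 = b
          · have dtest : ((fun k => decide (i1 = (a :: as).getD k 0) &&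
                decide (i2 = (b :: bs).getD k 0)) 0) = true := by
              simp [h1, h2]
            have rtest : ((fun p : Int × Int × Int => p.1 == i1 && p.2.1 == i2) (a, (b, c))) = true := by
              simp [h1.symm, h2.symm]
            rw [List.find?_cons_of_pos (a := 0) (l := (List.range as.length).map Nat.succ) dtest,
              List.find?_cons_of_pos (a := ((a, (b, c)) : Int × Int × Int))
                (l := as.zip (bs.zip cs)) rtest]
            rfl
          · have dtest : ¬ ((fun k => decide (i1 = (a :: as).getD k 0) &&
                decide (i2 = (b :: bs).getD k 0)) 0) = true := by
              simp [h2]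
            have rtest : ¬ ((fun p : Int × Int × Int => p.1 == i1 && p.2.1 == i2) (a, (b, c))) = true := by
              simp [Ne.symm h2]
            rw [List.find?_cons_of_neg (a := 0) (l := (List.range as.length).map Nat.succ) dtest,
              List.find?_cons_of_neg (a := ((a, (b, c)) : Int × Int × Int))
                (l := as.zip (bs.zip cs)) rtest,
              List.find?_map, hpred, hbind, ih bs cs hpre']
        · have dtest : ¬ ((fun k => decide (i1 = (a :: as).getD k 0) &&
              decide (i2 = (b :: bs).getD k 0)) 0) = true := by
            simp [h1]
          have rtest : ¬ ((fun p : Int × Int × Int => p.1 == i1 && p.2.1 == i2) (a, (b, c))) = true := by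
            simp [Ne.symm h1]
          rw [List.find?_cons_of_neg (a := 0) (l := (List.range as.length).map Nat.succ) dtest,
            List.find?_cons_of_neg (a := ((a, (b, c)) : Int × Int × Int))
              (l := as.zip (bs.zip cs)) rtest,
            List.find?_map, hpred, hbind, ih bs cs hpre']

-- B's setdefault fold is a first-occurrence lookup.
theorem dict_setdefault_find (i1 i2 : Int) :
    ∀ (L : List (Int × Int × Int)) (d : PySem.Dict (Int × Int) Int),
      (L.foldl (fun d p => PySem.Dict.setdefault d (p.1, p.2.1) p.2.2) d).get? (i1, i2)
        = (d.get? (i1, i2)).or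
            ((L.find? (fun p => p.1 == i1 && p.2.1 == i2)).map (fun p => p.2.2)) := by
  intro L
  induction L with
  | nil => intro d; simp
  | cons p L ih =>
    intro d
    rw [List.foldl_cons, ih]
    by_cases hk : (i1, i2) = (p.1, p.2.1)
    · have h1 : p.1 = i1 := (congrArg Prod.fst hk).symm
      have h2 : p.2.1 = i2 := (congrArg Prod.snd hk).symm
      have rtest : ((fun q : Int × Int × Int => q.1 == i1 && q.2.1 == i2) p) = true := by
        simp [h1, h2]
      rw [List.find?_cons_of_pos (a := p) (l := L) rtest, hk,
        PySem.Dict.get?_setdefault_self]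
      cases PySem.Dict.get? d (p.1, p.2.1) with
      | none => rfl
      | some w => rfl

    · have rtest : ¬ ((fun q : Int × Int × Int => q.1 == i1 && q.2.1 == i2) p) = true := by
        simp only [Bool.and_eq_true, beq_iff_eq]
        intro hcon
        exact hk (by rw [hcon.1, hcon.2])
      rw [PySem.Dict.get?_setdefault_of_ne _ _ hk,
        List.find?_cons_of_neg (a := p) (l := L) rtest]

-- ===== VERDICT (by name: the statement is the Claim_ definition above) =====
theorem A_to_find (i1 i2 : Int) (r0 r1 r2 : List Int) :
    goScanA i2 r1 r2 ((PySem.List.pyRange 0 (r0.length : Int)).foldl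
        (fun acc i => if i1 = PySem.List.pyGetD r0 i 0 then acc ++ [i] else acc) [])
      = ((List.range r0.length).find?
          (fun k => decide (i1 = r0.getD k 0) && decide (i2 = r1.getD k 0))).bind
          (fun k => r2[k]?) :=
  calc goScanA i2 r1 r2 ((PySem.List.pyRange 0 (r0.length : Int)).foldl
        (fun acc i => if i1 = PySem.List.pyGetD r0 i 0 then acc ++ [i] else acc) [])
      = goScanA i2 r1 r2 ([] ++ (PySem.List.pyRange 0 (r0.length : Int)).filter
          (fun i => decide (i1 = PySem.List.pyGetD r0 i 0))) :=
        congrArg _ (PySem.List.foldl_append_ite_eq_filter _ _ _)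
    _ = goScanA i2 r1 r2 (((List.range r0.length).map (fun k : Nat => (k : Int))).filter
          (fun i => decide (i1 = PySem.List.pyGetD r0 i 0))) := by
        rw [List.nil_append, PySem.List.pyRange_zero_nat]
    _ = goScanA i2 r1 r2 (List.map (fun k : Nat => (k : Int))
          ((List.range r0.length).filter (fun k => decide (i1 = r0.getD k 0)))) := by
        rw [List.filter_map]
        congr 1
        congr 1
        congr 1
        funext k
        simp
    _ = ((List.range r0.length).find?
          (fun k => decide (i1 = r0.getD k 0) && decide (i2 = r1.getD k 0))).bind
          (fun k => r2[k]?) :=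
        goScanA_filter i1 i2 r0 r1 r2 (List.range r0.length)

-- ===== VERDICT (by name: the statement is the Claim_ definition above) =====
theorem get_out_org_spec : Claim_equal_get_out_org := by
  intro i1 i2 t _ hpre
  obtain ⟨hlen, hrows⟩ := hpre
  unfold Spec_get_out_org
  rcases t with _ | ⟨r0, t⟩; · simp at hlen
  rcases t with _ | ⟨r1, t⟩; · simp at hlen
  rcases t with _ | ⟨r2, t⟩; · simp at hlen
  simp only [List.getD_cons_zero, List.getD_cons_succ] at hrows
  have hg0 : PySem.List.pyGet? (r0 :: r1 :: r2 :: t) (0 : Int) = some r0 := by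
    simp [PySem.List.pyGet?_zero]
  have hg1 : PySem.List.pyGet? (r0 :: r1 :: r2 :: t) (1 : Int) = some r1 := by
    rw [show (1 : Int) = ((1 : Nat) : Int) by norm_num, PySem.List.pyGet?_natCast]; rfl
  have hg2 : PySem.List.pyGet? (r0 :: r1 :: r2 :: t) (2 : Int) = some r2 := by
    rw [show (2 : Int) = ((2 : Nat) : Int) by norm_num, PySem.List.pyGet?_natCast]; rfl
  unfold get_out_org get_out_org_alt
  rw [hg0, hg1, hg2]
  simp only [Option.getD_some]
  have hB : ((r0.zip (r1.zip r2)).foldl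
        (fun d p => PySem.Dict.setdefault d (p.1, p.2.1) p.2.2) PySem.Dict.empty).get? (i1, i2)
      = ((r0.zip (r1.zip r2)).find? (fun p => p.1 == i1 && p.2.1 == i2)).map
          (fun p => p.2.2) :=
    (dict_setdefault_find i1 i2 (r0.zip (r1.zip r2)) PySem.Dict.empty).trans
      (by rw [PySem.Dict.get?_empty, Option.none_or])
  exact (A_to_find i1 i2 r0 r1 r2).trans ((core_find i1 i2 r0 r1 r2 hrows).trans hB.symm)
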